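-- pv_equiv track=rewrite | github.com/Thales-Henrique-Alves-Moreira/Console-Python | Console Python/console/plugins/cmdSystem/utils/utils.py | returnDir
-- ===== SOURCE A (Python) =====
-- def returnDir(folder):
--     folder = [*folder]
--     countSlashes = 0
--     pos1 = 0
--     pos2 = 0
--
--     for i in range(len(folder) - 1, -1, - 1):
--         if folder[i] == "/" and countSlashes < 2:
--
--             if countSlashes == 0:
--                 pos2 = i + 1
--             else:
--                 pos1 = i + 1
--
--             countSlashes += 1
--
--     del folder[pos1:pos2]
--     return ''.join(folder)
-- ===== SOURCE B (Python) =====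
-- def returnDir(folder):
--     parts = folder.split('/')
--     return '/'.join(parts[:-2] + parts[-1:])
-- ===== Notes on version B (the rewrite author's own statement) =====
-- stated objective: simpler
-- what changed: Replaces the reverse index scan for the last two slashes plus char-list slice deletion by splitting the path on the slash separator and rejoining all components except the second-to-last.
import Mathlib
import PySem

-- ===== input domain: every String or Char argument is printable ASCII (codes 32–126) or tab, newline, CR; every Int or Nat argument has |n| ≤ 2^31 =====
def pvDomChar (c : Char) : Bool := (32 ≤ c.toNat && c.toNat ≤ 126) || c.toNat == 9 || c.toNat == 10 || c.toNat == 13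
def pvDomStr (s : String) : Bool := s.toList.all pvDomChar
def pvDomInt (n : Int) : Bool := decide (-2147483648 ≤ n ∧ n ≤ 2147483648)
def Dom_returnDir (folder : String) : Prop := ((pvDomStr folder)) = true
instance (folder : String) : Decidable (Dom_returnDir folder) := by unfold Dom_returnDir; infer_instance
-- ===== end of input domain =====

-- B splits on '/' and rejoins without the second-to-last component instead of A's reverse
-- index scan for the last two slashes and char-list slice deletion; objective: simpler.

-- ===== PORT A =====
-- one loop step of A's 'for i in range(len(folder)-1, -1, -1)' body; state = (countSlashes, pos1, pos2)
def returnDirStep (cs : List Char) (st : Int × Int × Int) (i : Int) : Int × Int × Int :=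
  if PySem.List.pyGet? cs i = some '/' ∧ st.1 < 2 then
    if st.1 = 0 then (st.1 + 1, st.2.1, i + 1) else (st.1 + 1, i + 1, st.2.2)
  else st

def returnDir (folder : String) : String :=
  let cs := folder.toList               -- folder = [*folder]
  let st := (PySem.List.pyRange ((cs.length : Int) - 1) (-1) (-1)).foldl (returnDirStep cs) (0, 0, 0)
  -- del folder[pos1:pos2]; return ''.join(folder)  (here pos1 ≤ pos2 on every run, so the
  -- remainder is folder[:pos1] ++ folder[pos2:], with Python's slice clamping)
  String.ofList (PySem.List.slice cs none (some st.2.1) ++ PySem.List.slice cs (some st.2.2) none)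

-- ===== PORT B =====
def returnDir_alt (folder : String) : String :=
  let parts := PySem.Chars.splitOn folder.toList ['/']                     -- folder.split('/')
  String.ofList (PySem.Chars.join ['/']                                    -- '/'.join(
    (PySem.List.slice parts none (some (-2)) ++                            --   parts[:-2] +
     PySem.List.slice parts (some (-1)) none))                             --   parts[-1:] )

-- ===== PRECONDITION & SPEC =====
def Spec_returnDir (folder : String) (out : String) : Prop := out = returnDir_alt folder
instance (folder : String) (out : String) : Decidable (Spec_returnDir folder out) := by unfold Spec_returnDir; infer_instance

-- ===== CLAIM (what is proved, stated in full; the proofs are below) =====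
def Claim_equal_returnDir : Prop := ∀ (folder : String), Dom_returnDir folder → Spec_returnDir folder (returnDir folder)

-- ===== LEMMAS AND PROOFS =====

theorem modifyHead_id' {α : Type} (L : List α) : List.modifyHead (fun x => x) L = L := by
  cases L <;> rfl

theorem take_len {α : Type} (A B : List α) : (A ++ B).take A.length = A := by
  induction A with
  | nil => rfl
  | cons a t ih => simp [ih]

theorem drop_len {α : Type} (A B : List α) : (A ++ B).drop A.length = B := by
  induction A with
  | nil => rfl
  | cons a t ih => simp [ih]

-- reference splitter on a single separator char
def split1 (c : Char) : List Char → List (List Char)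
  | [] => [[]]
  | x :: rest => if x = c then [] :: split1 c rest else (split1 c rest).modifyHead (x :: ·)

theorem split1_ne_nil (c : Char) (l : List Char) : split1 c l ≠ [] := by
  induction l with
  | nil => simp [split1]
  | cons x rest ih =>
    simp only [split1]
    split_ifs
    · simp
    · cases h : split1 c rest with
      | nil => exact absurd h ih
      | cons a t => simp

theorem splitOn_go_eq (c : Char) (l cur : List Char) (acc : List (List Char))
    (fuel : Nat) (hf : l.length ≤ fuel) :
    PySem.Chars.splitOn.go [c] fuel l cur acc
      = acc.reverse ++ (split1 c l).modifyHead (cur.reverse ++ ·) := by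
  induction fuel generalizing l cur acc with
  | zero =>
    have : l = [] := by cases l <;> simp_all
    subst this
    simp [PySem.Chars.splitOn.go, split1]
  | succ n ih =>
    cases l with
    | nil => simp [PySem.Chars.splitOn.go, split1]
    | cons x rest =>
      by_cases hx : x = c
      · subst hx
        have hpre : List.isPrefixOf [x] (x :: rest) = true := by simp [List.isPrefixOf]
        simp only [PySem.Chars.splitOn.go, hpre, if_pos, List.length_cons, List.length_nil,
          List.drop_succ_cons, List.drop_zero]
        rw [ih rest [] (cur.reverse :: acc) (by simpa using Nat.le_of_succ_le_succ hf)]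
        simp [split1, modifyHead_id']
      · have hpre : List.isPrefixOf [c] (x :: rest) = false := by
          simp [List.isPrefixOf]; exact fun h => absurd h.symm hx
        simp only [PySem.Chars.splitOn.go, hpre]
        rw [if_neg (by simp)]
        rw [ih rest (x :: cur) acc (by simpa using Nat.le_of_succ_le_succ hf)]
        cases h : split1 c rest with
        | nil => exact absurd h (split1_ne_nil c rest)
        | cons a t => simp [split1, hx, h]

theorem splitOn_eq_split1 (c : Char) (l : List Char) :
    PySem.Chars.splitOn l [c] = split1 c l := by
  have h := splitOn_go_eq c l [] [] (l.length + 1) (by omega)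
  unfold PySem.Chars.splitOn
  rw [h]
  cases split1 c l <;> simp

theorem split1_of_not_mem (c : Char) (l : List Char) (h : c ∉ l) : split1 c l = [l] := by
  induction l with
  | nil => rfl
  | cons x rest ih =>
    simp only [List.mem_cons, not_or] at h
    simp [split1, ih h.2, show ¬ x = c from fun hh => h.1 hh.symm]

theorem split1_append (c : Char) (x y : List Char) :
    split1 c (x ++ c :: y) = split1 c x ++ split1 c y := by
  induction x with
  | nil => simp [split1]
  | cons a x' ih =>
    by_cases ha : a = c
    · simp [split1, ha, ih]
    · cases h : split1 c x' with
      | nil => exact absurd h (split1_ne_nil c x')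
      | cons b t => simp [split1, ha, ih, h]

theorem join_cons_head (c : Char) (x : Char) (h : List Char) (t : List (List Char)) :
    PySem.Chars.join [c] ((x :: h) :: t) = x :: PySem.Chars.join [c] (h :: t) := by
  cases t with
  | nil => simp [PySem.Chars.join, List.intercalate]
  | cons q r => rw [PySem.Chars.join_cons_cons, PySem.Chars.join_cons_cons]; simp

theorem join_split1 (c : Char) (l : List Char) :
    PySem.Chars.join [c] (split1 c l) = l := by
  induction l with
  | nil => simp [split1, PySem.Chars.join, List.intercalate]
  | cons x rest ih =>
    by_cases hx : x = c
    · cases h : split1 c rest with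
      | nil => exact absurd h (split1_ne_nil c rest)
      | cons a t =>
        rw [show split1 c (x :: rest) = [] :: a :: t by simp [split1, hx, h]]
        rw [PySem.Chars.join_cons_cons, ← h, ih]
        simp [hx]
    · cases h : split1 c rest with
      | nil => exact absurd h (split1_ne_nil c rest)
      | cons a t =>
        simp only [split1, if_neg hx, h, List.modifyHead]
        rw [join_cons_head, ← h, ih]

theorem join_append_last (c : Char) (A : List (List Char)) (hA : A ≠ []) (v : List Char) :
    PySem.Chars.join [c] (A ++ [v]) = PySem.Chars.join [c] A ++ c :: v := by
  induction A with
  | nil => exact absurd rfl hA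
  | cons a t ih =>
    cases t with
    | nil => simp [PySem.Chars.join, List.intercalate]
    | cons b r =>
      simp only [List.cons_append]
      rw [PySem.Chars.join_cons_cons, ← List.cons_append, ih (by simp),
        PySem.Chars.join_cons_cons]
      simp

-- loop over the whole index range, as a function of the scanned list
def loopA (cs : List Char) : (Int × Int × Int) → Int × Int × Int :=
  fun st => (PySem.List.pyRange ((cs.length : Int) - 1) (-1) (-1)).foldl (returnDirStep cs) st

theorem loopA_nil (st : Int × Int × Int) : loopA [] st = st := by
  unfold loopA
  have h : ((([] : List Char).length : Int) - 1) = -1 := by simp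
  rw [h, PySem.List.pyRange_neg_one_eq_nil (by norm_num)]
  rfl

theorem loopA_snoc (cs : List Char) (x : Char) (st : Int × Int × Int) :
    loopA (cs ++ [x]) st = loopA cs (returnDirStep (cs ++ [x]) st (cs.length : Int)) := by
  unfold loopA
  have hlen : ((cs ++ [x]).length : Int) - 1 = (cs.length : Int) := by
    simp
  rw [hlen]
  rw [PySem.List.pyRange_neg_one_cons (by omega : (-1 : Int) < (cs.length : Int))]
  rw [List.foldl_cons]
  apply PySem.List.foldl_congr_mem
  intro st' i hi
  rw [PySem.List.mem_pyRange_neg_one] at hi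
  obtain ⟨hi1, hi2⟩ := hi
  obtain ⟨i', rfl⟩ : ∃ n : Nat, i = (n : Int) := ⟨i.toNat, by omega⟩
  have hlt : i' < cs.length := by omega
  unfold returnDirStep
  rw [PySem.List.pyGet?_natCast, PySem.List.pyGet?_natCast,
    List.getElem?_append_left hlt]

theorem loopA_noop (a v : List Char) (st : Int × Int × Int) (hv : '/' ∉ v) :
    loopA (a ++ v) st = loopA a st := by
  induction v using List.reverseRecOn generalizing st with
  | nil => simp
  | append_singleton v' x ih =>
    rw [← List.append_assoc, loopA_snoc]
    have hx : x ≠ '/' := by simp at hv; tauto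
    have hv' : '/' ∉ v' := by simp at hv; tauto
    have hget : PySem.List.pyGet? ((a ++ v') ++ [x]) (((a ++ v').length : Int)) = some x := by
      rw [PySem.List.pyGet?_natCast]; simp
    rw [show returnDirStep ((a ++ v') ++ [x]) st ((a ++ v').length : Int) = st by
      unfold returnDirStep; rw [hget]; simp [hx]]
    exact ih st hv'

theorem loopA_frozen (a : List Char) (p1 p2 : Int) : loopA a (2, p1, p2) = (2, p1, p2) := by
  induction a using List.reverseRecOn with
  | nil => exact loopA_nil _
  | append_singleton a' x ih =>
    rw [loopA_snoc]
    rw [show returnDirStep (a' ++ [x]) (2, p1, p2) (a'.length : Int) = (2, p1, p2) by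
      unfold returnDirStep; simp]
    exact ih

theorem step_slash (cs : List Char) (u : List Char) (rest : List Char) (st : Int × Int × Int)
    (hcs : cs = u ++ '/' :: rest) :
    returnDirStep cs st (u.length : Int)
      = if st.1 < 2 then
          (if st.1 = 0 then (st.1 + 1, st.2.1, (u.length : Int) + 1)
           else (st.1 + 1, (u.length : Int) + 1, st.2.2))
        else st := by
  subst hcs
  have hget : PySem.List.pyGet? (u ++ '/' :: rest) ((u.length : Int)) = some '/' := by
    rw [PySem.List.pyGet?_natCast]; simp
  unfold returnDirStep
  rw [hget]; simp

-- decompose a list at its last occurrence of c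
theorem last_occ (c : Char) (l : List Char) :
    c ∉ l ∨ ∃ u v, l = u ++ c :: v ∧ c ∉ v := by
  induction l using List.reverseRecOn with
  | nil => left; simp
  | append_singleton l' x ih =>
    by_cases hx : x = c
    · right; exact ⟨l', [], by simp [hx], by simp⟩
    · rcases ih with h | ⟨u, v, rfl, hv⟩
      · left; simp [h, Ne.symm hx]
      · right; exact ⟨u, v ++ [x], by simp, by simp [hv, Ne.symm hx]⟩

-- the common value of both programs on the three slash-count cases
theorem main_eq (cs : List Char) :
    PySem.List.slice cs none (some (loopA cs (0, 0, 0)).2.1)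
      ++ PySem.List.slice cs (some (loopA cs (0, 0, 0)).2.2) none
    = PySem.Chars.join ['/']
        (PySem.List.slice (split1 '/' cs) none (some (-2)) ++
         PySem.List.slice (split1 '/' cs) (some (-1)) none) := by
  rcases last_occ '/' cs with h0 | ⟨u, v, rfl, hv⟩
  · -- no slash
    have hloop : loopA cs (0, 0, 0) = (0, 0, 0) := by
      have := loopA_noop [] cs (0, 0, 0) h0
      simpa using this
    rw [hloop, split1_of_not_mem '/' cs h0]
    dsimp only
    rw [PySem.List.slice_to cs (show (0:Int) ≤ 0 from le_refl 0),
      PySem.List.slice_from cs (show (0:Int) ≤ 0 from le_refl 0),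
      PySem.List.slice_to_neg_ofNat _ 2 (by omega), PySem.List.slice_from_neg_one]
    simp [PySem.Chars.join, List.intercalate]
  · rcases last_occ '/' u with h1 | ⟨w, m, rfl, hm⟩
    · -- exactly one slash
      have hloop : loopA (u ++ '/' :: v) (0, 0, 0) = (1, 0, (u.length : Int) + 1) := by
        have h1' : loopA (u ++ '/' :: v) (0,0,0) = loopA (u ++ ['/']) (0,0,0) := by
          have := loopA_noop (u ++ ['/']) v (0,0,0) hv
          simpa using this
        rw [h1', loopA_snoc]
        rw [show returnDirStep (u ++ ['/']) (0,0,0) (u.length : Int)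
              = (1, 0, (u.length : Int) + 1) from by
          rw [step_slash (u ++ ['/']) u [] _ rfl]; norm_num]
        have := loopA_noop [] u (1, 0, (u.length : Int) + 1) h1
        simpa using this
      have hsplit : split1 '/' (u ++ '/' :: v) = [u, v] := by
        rw [split1_append, split1_of_not_mem '/' u h1, split1_of_not_mem '/' v hv]
        rfl
      rw [hloop, hsplit]
      dsimp only
      rw [PySem.List.slice_to (u ++ '/' :: v) (show (0:Int) ≤ 0 from le_refl 0),
        PySem.List.slice_from (u ++ '/' :: v) (show (0:Int) ≤ (u.length : Int) + 1 by omega),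
        PySem.List.slice_to_neg_ofNat _ 2 (by omega), PySem.List.slice_from_neg_one]
      rw [show (((u.length : Int) + 1)).toNat = u.length + 1 from by omega]
      have hd : (u ++ '/' :: v).drop (u.length + 1) = v := by
        rw [show u ++ '/' :: v = (u ++ ['/']) ++ v by simp,
          show u.length + 1 = (u ++ ['/']).length by simp]
        exact drop_len _ _
      simp [hd, PySem.Chars.join, List.intercalate]
    · -- at least two slashes: cs = (w ++ '/' :: m) ++ '/' :: v
      have hloop : loopA ((w ++ '/' :: m) ++ '/' :: v) (0, 0, 0)
          = (2, (w.length : Int) + 1, ((w ++ '/' :: m).length : Int) + 1) := by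
        have h1' : loopA ((w ++ '/' :: m) ++ '/' :: v) (0,0,0)
            = loopA ((w ++ '/' :: m) ++ ['/']) (0,0,0) := by
          have := loopA_noop ((w ++ '/' :: m) ++ ['/']) v (0,0,0) hv
          simpa using this
        rw [h1', loopA_snoc]
        rw [show returnDirStep ((w ++ '/' :: m) ++ ['/']) (0,0,0) (((w ++ '/' :: m).length) : Int)
              = (1, 0, ((w ++ '/' :: m).length : Int) + 1) from by
          rw [step_slash _ (w ++ '/' :: m) [] _ rfl]; norm_num]
        have h2' : loopA (w ++ '/' :: m) (1, 0, ((w ++ '/' :: m).length : Int) + 1)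
            = loopA (w ++ ['/']) (1, 0, ((w ++ '/' :: m).length : Int) + 1) := by
          have := loopA_noop (w ++ ['/']) m
            (1, 0, ((w ++ '/' :: m).length : Int) + 1) hm
          simpa using this
        rw [h2', loopA_snoc]
        rw [show returnDirStep (w ++ ['/']) (1, 0, ((w ++ '/' :: m).length : Int) + 1)
              ((w.length) : Int)
              = (2, (w.length : Int) + 1, ((w ++ '/' :: m).length : Int) + 1) from by
          rw [step_slash _ w [] _ rfl]; norm_num]
        exact loopA_frozen w _ _
      have hsplit : split1 '/' ((w ++ '/' :: m) ++ '/' :: v)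
          = split1 '/' w ++ [m] ++ [v] := by
        rw [List.append_assoc]
        simp only [List.cons_append]
        rw [split1_append, split1_append,
          split1_of_not_mem '/' m hm, split1_of_not_mem '/' v hv]
        simp
      rw [hloop, hsplit]
      dsimp only
      rw [PySem.List.slice_to ((w ++ '/' :: m) ++ '/' :: v)
          (show (0:Int) ≤ (w.length : Int) + 1 by omega),
        PySem.List.slice_from ((w ++ '/' :: m) ++ '/' :: v)
          (show (0:Int) ≤ ((w ++ '/' :: m).length : Int) + 1 by omega),
        PySem.List.slice_to_neg_ofNat _ 2 (by omega), PySem.List.slice_from_neg_one]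
      rw [show (((w.length : Int) + 1)).toNat = w.length + 1 from by omega,
        show ((((w ++ '/' :: m).length : Int) + 1)).toNat = (w ++ '/' :: m).length + 1 from by
          omega]
      have htake : (split1 '/' w ++ [m] ++ [v]).take ((split1 '/' w ++ [m] ++ [v]).length - 2)
          = split1 '/' w := by
        rw [show (split1 '/' w ++ [m] ++ [v]).length - 2 = (split1 '/' w).length by simp,
          List.append_assoc]
        exact take_len _ _
      have hdrop : (split1 '/' w ++ [m] ++ [v]).drop ((split1 '/' w ++ [m] ++ [v]).length - 1)
          = [v] := by
        rw [show (split1 '/' w ++ [m] ++ [v]).length - 1 = (split1 '/' w ++ [m]).length by simp]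
        exact drop_len _ _
      rw [htake, hdrop]
      rw [join_append_last '/' (split1 '/' w) (split1_ne_nil '/' w) v, join_split1]
      have hA1 : ((w ++ '/' :: m) ++ '/' :: v).take (w.length + 1) = w ++ ['/'] := by
        rw [show (w ++ '/' :: m) ++ '/' :: v = (w ++ ['/']) ++ (m ++ '/' :: v) by simp,
          show w.length + 1 = (w ++ ['/']).length by simp]
        exact take_len _ _
      have hA2 : ((w ++ '/' :: m) ++ '/' :: v).drop ((w ++ '/' :: m).length + 1) = v := by
        rw [show (w ++ '/' :: m) ++ '/' :: v = ((w ++ '/' :: m) ++ ['/']) ++ v by simp,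
          show (w ++ '/' :: m).length + 1 = ((w ++ '/' :: m) ++ ['/']).length by
            simp only [List.length_append, List.length_cons, List.length_nil]]
        exact drop_len _ _
      rw [hA1, hA2]
      simp

-- ===== VERDICT (by name: the statement is the Claim_ definition above) =====
theorem returnDir_spec : Claim_equal_returnDir := by
  intro folder _
  unfold Spec_returnDir returnDir returnDir_alt
  dsimp only
  rw [splitOn_eq_split1]
  exact congrArg String.ofList (main_eq folder.toList)
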